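-- pv_equiv track=rewrite | github.com/eejji/Algorithm | 프로그래머스/0/181890. 왼쪽 오른쪽/왼쪽 오른쪽.py | solution
-- ===== SOURCE A (Python) =====
-- def solution(str_list):
--     a = []
--     for i in range(len(str_list)):
--         if str_list[i] == "l" or str_list[i] == "r":
--             if str_list[i] == "l":
--                 a = str_list[:i]
--                 return a
--             else:
--                 a = str_list[i+1:]
--                 return a
--     return []
-- ===== SOURCE B (Python) =====
-- def solution(str_list):
--     tag = None
--     res = []
--     for i in range(len(str_list) - 1, -1, -1):
--         h = str_list[i]
--         if h == "l":
--             tag, res = "l", []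
--         elif h == "r":
--             tag, res = "r", str_list[i + 1:]
--         elif tag == "l":
--             res.append(h)
--     return res[::-1] if tag == "l" else res
-- ===== Notes on version B (the rewrite author's own statement) =====
-- stated objective: alternative
-- what changed: B replaces A's left-to-right early-return scan with a single right-to-left fold over the list that maintains a (marker, result) state, building the 'l'-prefix back-to-front in a reversed accumulator and flipping it once at the end.
import Mathlib
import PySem

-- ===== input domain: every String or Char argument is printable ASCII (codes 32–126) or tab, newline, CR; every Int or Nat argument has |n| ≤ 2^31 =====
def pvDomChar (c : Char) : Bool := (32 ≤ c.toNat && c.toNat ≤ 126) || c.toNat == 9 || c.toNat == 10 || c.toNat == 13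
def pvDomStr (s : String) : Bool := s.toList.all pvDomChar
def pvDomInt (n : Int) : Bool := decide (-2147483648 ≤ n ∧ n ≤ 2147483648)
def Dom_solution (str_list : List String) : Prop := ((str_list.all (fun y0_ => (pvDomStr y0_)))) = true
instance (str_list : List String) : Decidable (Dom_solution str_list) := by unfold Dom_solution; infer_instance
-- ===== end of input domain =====

-- B replaces A's left-to-right early-return scan with a right-to-left fold over the list
-- maintaining a (marker, result) state and a reversed accumulator (objective: alternative).


-- ===== PORT A =====
-- literal port of A: index loop over range(len), early return at the first "l" or "r"
def solutionGo (str_list : List String) (i : Nat) : List String :=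
  if _h : i < str_list.length then
    if PySem.List.pyGetD str_list (i : Int) "" = "l" ∨ PySem.List.pyGetD str_list (i : Int) "" = "r" then
      if PySem.List.pyGetD str_list (i : Int) "" = "l" then
        PySem.List.slice str_list none (some (i : Int))
      else
        PySem.List.slice str_list (some ((i : Int) + 1)) none
    else solutionGo str_list (i + 1)
  else []
termination_by str_list.length - i

def solution (str_list : List String) : List String :=
  solutionGo str_list 0

-- ===== PORT B =====
-- port of B: one loop body of the right-to-left scan, state = (tag, res)
def stepB (str_list : List String) (s : Option String × List String) (i : Int) :
    Option String × List String :=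
  let h := PySem.List.pyGetD str_list i ""
  if h = "l" then (some "l", [])
  else if h = "r" then (some "r", PySem.List.slice str_list (some (i + 1)) none)
  else if s.1 = some "l" then (s.1, s.2 ++ [h])
  else s

def solution_alt (str_list : List String) : List String :=
  let fin := (PySem.List.pyRange ((str_list.length : Int) - 1) (-1) (-1)).foldl
      (stepB str_list) (none, [])
  if fin.1 = some "l" then fin.2.reverse else fin.2

-- ===== PRECONDITION & SPEC =====
def Spec_solution (str_list : List String) (out : List String) : Prop := out = solution_alt str_list
instance (str_list : List String) (out : List String) : Decidable (Spec_solution str_list out) := by unfold Spec_solution; infer_instance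

-- ===== CLAIM (what is proved, stated in full; the proofs are below) =====
def Claim_equal_solution : Prop := ∀ (str_list : List String), Dom_solution str_list → Spec_solution str_list (solution str_list)

-- ===== LEMMAS AND PROOFS =====

-- structural recursion both ports are reduced to: (marker found, its prefix/suffix payload)
def Fm : List String → Option String × List String
  | [] => (none, [])
  | h :: t =>
    if h = "l" then (some "l", [])
    else if h = "r" then (some "r", t)
    else
      let p := Fm t
      if p.1 = some "l" then (some "l", h :: p.2) else p

-- same, but with the "l"-payload kept reversed (B's accumulator)
def Fr : List String → Option String × List String
  | [] => (none, [])
  | h :: t =>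
    if h = "l" then (some "l", [])
    else if h = "r" then (some "r", t)
    else
      let p := Fr t
      if p.1 = some "l" then (some "l", p.2 ++ [h]) else p

theorem Fr_eq (xs : List String) :
    (Fr xs).1 = (Fm xs).1 ∧
      (Fr xs).2 = (if (Fm xs).1 = some "l" then (Fm xs).2.reverse else (Fm xs).2) := by
  induction xs with
  | nil => simp [Fr, Fm]
  | cons h t ih =>
    obtain ⟨iht, ihr⟩ := ih
    by_cases h1 : h = "l"
    · simp [Fr, Fm, h1]
    · by_cases h2 : h = "r"
      · simp [Fr, Fm, h2]
      · by_cases hl : (Fm t).1 = some "l"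
        · simp [Fr, Fm, h1, h2, iht, ihr, hl]
        · simp [Fr, Fm, h1, h2, iht, ihr, hl]

theorem pyGetD_append_cons (pre t : List String) (h : String) :
    PySem.List.pyGetD (pre ++ h :: t) ((pre.length : Nat) : Int) "" = h := by
  rw [PySem.List.pyGetD_natCast]
  simp [List.getD_eq_getElem?_getD]

theorem solutionGo_eq_Fm (xs : List String) (pre : List String) :
    solutionGo (pre ++ xs) pre.length =
      (if (Fm xs).1 = some "l" then pre ++ (Fm xs).2 else (Fm xs).2) := by
  induction xs generalizing pre with
  | nil =>
    rw [solutionGo]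
    simp [Fm]
  | cons h t ih =>
    have hlen : pre.length < (pre ++ h :: t).length := by simp
    have hget := pyGetD_append_cons pre t h
    rw [solutionGo, dif_pos hlen, hget]
    by_cases h1 : h = "l"
    · rw [if_pos (Or.inl h1), if_pos h1]
      have : PySem.List.slice (pre ++ h :: t) none (some ((pre.length : Nat) : Int)) = pre := by
        rw [PySem.List.slice_to_natCast]
        simp
      rw [this]
      simp [Fm, h1]
    · by_cases h2 : h = "r"
      · rw [if_pos (Or.inr h2), if_neg h1]
        have : PySem.List.slice (pre ++ h :: t) (some (((pre.length : Nat) : Int) + 1)) none = t := by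
          have hc : ((pre.length : Nat) : Int) + 1 = ((pre.length + 1 : Nat) : Int) := by push_cast; ring
          rw [hc, PySem.List.slice_from_natCast,
            show pre ++ h :: t = (pre ++ [h]) ++ t by simp,
            show pre.length + 1 = (pre ++ [h]).length by simp, List.drop_left]
        rw [this]
        simp [Fm, h2]
      · rw [if_neg (by rintro (c1 | c2); exacts [h1 c1, h2 c2])]
        have hassoc : pre ++ h :: t = (pre ++ [h]) ++ t := by simp
        have hlen2 : pre.length + 1 = (pre ++ [h]).length := by simp
        rw [hassoc, hlen2, ih (pre ++ [h])]
        simp only [Fm, if_neg h1, if_neg h2]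
        by_cases hl : (Fm t).1 = some "l"
        · simp [hl]
        · simp [hl]

theorem stepB_state (xs : List String) (j : Nat) (hj : j < xs.length) :
    stepB xs (Fr (xs.drop (j + 1))) (j : Int) = Fr (xs.drop j) := by
  have hdrop : xs.drop j = xs[j] :: xs.drop (j + 1) := List.drop_eq_getElem_cons hj
  have hget : PySem.List.pyGetD xs ((j : Nat) : Int) "" = xs[j] := by
    rw [PySem.List.pyGetD_natCast]
    simp [List.getD_eq_getElem?_getD, List.getElem?_eq_getElem hj]
  have hslice : PySem.List.slice xs (some (((j : Nat) : Int) + 1)) none = xs.drop (j + 1) := by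
    have hc : ((j : Nat) : Int) + 1 = ((j + 1 : Nat) : Int) := by push_cast; ring
    rw [hc, PySem.List.slice_from_natCast]
  rw [hdrop]
  simp only [stepB, Fr, hget, hslice]
  by_cases h1 : xs[j] = "l"
  · simp [h1]
  · by_cases h2 : xs[j] = "r"
    · simp [h2]
    · by_cases hl : (Fr (xs.drop (j + 1))).1 = some "l"
      · simp [h1, h2, hl]
      · simp [h1, h2, hl]

theorem foldB_inv (xs : List String) (j : Nat) (hj : j ≤ xs.length) :
    (PySem.List.pyRange ((j : Int) - 1) (-1) (-1)).foldl (stepB xs) (Fr (xs.drop j)) = Fr xs := by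
  induction j with
  | zero =>
    rw [PySem.List.pyRange_neg_one_eq_nil (by norm_num)]
    simp
  | succ j ih =>
    have hjlt : j < xs.length := hj
    have hc : ((j + 1 : Nat) : Int) - 1 = (j : Int) := by push_cast; ring
    rw [hc, PySem.List.pyRange_neg_one_cons (by omega)]
    · simp only [List.foldl_cons]
      rw [stepB_state xs j hjlt]
      exact ih (Nat.le_of_lt hjlt)

-- ===== VERDICT (by name: the statement is the Claim_ definition above) =====
theorem solution_spec : Claim_equal_solution := by
  intro xs _
  unfold Spec_solution solution solution_alt
  have hA := solutionGo_eq_Fm xs []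
  simp only [List.nil_append, List.length_nil] at hA
  have hB := foldB_inv xs xs.length (Nat.le_refl _)
  rw [List.drop_length] at hB
  have hFr0 : Fr ([] : List String) = (none, []) := rfl
  rw [hFr0] at hB
  rw [hA]
  simp only [hB]
  obtain ⟨ht, hr⟩ := Fr_eq xs
  rw [ht, hr]
  by_cases hl : (Fm xs).1 = some "l"
  · simp [hl]
  · simp [hl]
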